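-- pv_equiv track=rewrite | github.com/ShaharEli/algoTrain | 2019AA/2019AA.py | make_closed_helper
-- ===== SOURCE A (Python) =====
-- def make_closed_helper(dict1, start):
--     if not dict1:
--         return dict1
--     keys = list(dict1.keys())
--     if start >= len(dict1):
--         return dict1
--
--     start_key = keys[start]
--     curr_key = keys[start]
--     i = 0
--     while dict1.get(curr_key, None) is not None:
--         i += 1
--         curr_key = dict1.get(curr_key)
--         if curr_key == start_key:
--             return make_closed_helper(dict1, start + i)
--         if i > len(dict1) - start:
--             if curr_key != start_key:
--                 del dict1[start_key]
--                 return make_closed_helper(dict1, start)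
--             return dict1
--     del dict1[start_key]
--     return make_closed_helper(dict1, start)
-- ===== SOURCE B (Python) =====
-- def make_closed_helper(dict1, start):
--     if not dict1 or start >= len(dict1):
--         return dict1
--     n = len(dict1)
--     keys = list(dict1)
--     dead = set()
--     j = start
--     while j < n:
--         k = keys[j]
--         c = k
--         i = 0
--         while True:
--             c = None if c in dead else dict1.get(c)
--             if c is None:
--                 dead.add(k)
--                 j += 1
--                 break
--             i += 1
--             if c == k:
--                 j += i
--                 break
--             if i > n - j:
--                 dead.add(k)
--                 j += 1
--                 break
--     for k in dead:
--         del dict1[k]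
--     return dict1
-- ===== Notes on version B (the rewrite author's own statement) =====
-- stated objective: alternative
-- what changed: A recursively mutates the dict, rebuilding the key list and re-resolving positions after every deletion; B makes a single iterative left-to-right pass over the original key list with a 'dead' set and pure index arithmetic (the cutoff len-start is the constant n-j), deleting the dead keys once at the end.
-- outside the precondition, e.g. on make_closed_helper({7: 8, 3: 0, 8: 7, 4: 1}, -1): A returns {7: 8, 8: 7}, B returns {7: 8, 3: 0, 8: 7}
import Mathlib
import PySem

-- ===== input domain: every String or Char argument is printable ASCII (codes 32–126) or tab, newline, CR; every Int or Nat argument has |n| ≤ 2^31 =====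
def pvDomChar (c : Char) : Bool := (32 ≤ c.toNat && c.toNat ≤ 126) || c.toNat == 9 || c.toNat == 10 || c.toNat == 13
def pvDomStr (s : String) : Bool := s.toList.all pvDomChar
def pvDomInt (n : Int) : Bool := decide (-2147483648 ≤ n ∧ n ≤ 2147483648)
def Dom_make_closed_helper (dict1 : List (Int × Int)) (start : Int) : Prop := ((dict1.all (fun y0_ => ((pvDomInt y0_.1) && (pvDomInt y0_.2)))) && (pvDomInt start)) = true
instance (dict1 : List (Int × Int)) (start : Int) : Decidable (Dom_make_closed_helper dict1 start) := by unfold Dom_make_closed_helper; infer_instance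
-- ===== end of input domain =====

-- B replaces A's recursive delete-and-restart (which mutates the dict and rebuilds the key
-- list each call) by one iterative pass over the fixed key list with a 'dead' set; same
-- return value (A mutates dict1 in place during the run, B deletes the dead keys at the
-- end — the final state of dict1 is the same, intermediate states differ).

-- ===== PORT A =====
inductive AWalk : Type where
  | jump (i : Int) : AWalk
  | delete : AWalk
  | stop : AWalk
deriving DecidableEq, Repr

-- A's inner while loop: curr = c, counter i; lim = len(dict1) - start (fixed in one call).
-- The Nat argument is a totality guard only: the loop provably exits within lim+1
-- iterations, and every call site passes more fuel than that.
def walkA (d : List (Int × Int)) (sk lim : Int) : Nat → Int → Int → AWalk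
  | 0, _, _ => .delete
  | fuel + 1, c, i =>
    match List.lookup c d with
    | none => .delete                       -- loop exits: del start_key; recurse(start)
    | some v =>
      let i' := i + 1
      if v = sk then .jump i'               -- return rec(start + i)
      else if i' > lim then
        (if v ≠ sk then .delete else .stop) -- (stop is Python's unreachable 'return dict1')
      else walkA d sk lim fuel v i'

-- A's recursion; the Nat argument is a totality guard (each call deletes an entry or
-- moves start forward, so the depth is bounded by 2*len+1; callers pass more than that)
def make_closed_helper_aux : List (Int × Int) → Int → Nat → List (Int × Int)
  | d, _, 0 => d
  | d, s, fuel + 1 =>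
    if d = [] then d
    else if s ≥ (d.length : Int) then d
    else
      match PySem.List.pyGet? (d.map Prod.fst) s with
      | none => d     -- keys[start]: IndexError (start < -len; outside Pre_)
      | some sk =>
        match walkA d sk ((d.length : Int) - s) (((d.length : Int) - s).toNat + 2) sk 0 with
        | .jump i => make_closed_helper_aux d (s + i) fuel
        | .delete => make_closed_helper_aux (List.eraseP (fun p => p.1 == sk) d) s fuel
        | .stop => d

def make_closed_helper (dict1 : List (Int × Int)) (start : Int) : List (Int × Int) :=
  make_closed_helper_aux dict1 start (dict1.length + ((dict1.length : Int) - start).toNat + 1)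

-- ===== PORT B =====
-- B's inner while loop: successors looked up in the original dict, masked by the dead
-- set; fuel is a totality guard exactly as in walkA
def walkB (dict1 : List (Int × Int)) (dead : PySem.Set Int) (k n j : Int) :
    Nat → Int → Int → Option Int
  | 0, _, _ => none
  | fuel + 1, c, i =>
    match (if PySem.Set.contains dead c then none else List.lookup c dict1) with
    | none => none                          -- dead.add(k); j += 1
    | some v =>
      let i' := i + 1
      if v = k then some i'                 -- j += i
      else if i' > n - j then none          -- dead.add(k); j += 1
      else walkB dict1 dead k n j fuel v i'

-- B's outer while loop over positions j of the fixed key list; returns the dead set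
-- (fuel is a totality guard: j advances by at least 1 per iteration)
def bLoop (dict1 : List (Int × Int)) (keys : List Int) (n : Int) :
    Nat → PySem.Set Int → Int → PySem.Set Int
  | 0, dead, _ => dead
  | fuel + 1, dead, j =>
    if j < n then
      match PySem.List.pyGet? keys j with
      | none => dead    -- keys[j]: IndexError (negative start; outside Pre_)
      | some k =>
        match walkB dict1 dead k n j ((n - j).toNat + 2) k 0 with
        | none => bLoop dict1 keys n fuel (PySem.Set.add dead k) (j + 1)
        | some i => bLoop dict1 keys n fuel dead (j + i)
    else dead

def make_closed_helper_alt (dict1 : List (Int × Int)) (start : Int) : List (Int × Int) :=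
  if dict1 = [] ∨ start ≥ (dict1.length : Int) then dict1
  else
    let n : Int := dict1.length
    let keys := dict1.map Prod.fst
    let dead := bLoop dict1 keys n ((n - start).toNat + 1) PySem.Set.empty start
    -- 'for k in dead: del dict1[k]' — exact: the resulting dict does not depend on the
    -- set's iteration order (deletions of distinct keys commute)
    dead.foldl (fun d k => List.eraseP (fun p => p.1 == k) d) dict1

-- ===== PRECONDITION & SPEC =====
-- Pre_ restricts to genuine dicts (no duplicate keys in the items list) and to the helper's
-- natural domain start >= 0 (callers pass 0): on a negative start A re-resolves the negative
-- index against the shrinking dict on every recursive call, raising IndexError on some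
-- inputs and producing accidental values on others (e.g. keys[-1] names a different key
-- after each deletion), which B's single pass over the fixed key list does not reproduce.
def Pre_make_closed_helper (dict1 : List (Int × Int)) (start : Int) : Prop :=
  (dict1.map Prod.fst).Nodup ∧ (0 ≤ start ∨ dict1 = [])
instance (dict1 : List (Int × Int)) (start : Int) : Decidable (Pre_make_closed_helper dict1 start) := by unfold Pre_make_closed_helper; infer_instance

def pvWitness_make_closed_helper : (List (Int × Int)) × Int := ([(1, 2), (2, 1), (3, 1)], 0)

def Spec_make_closed_helper (dict1 : List (Int × Int)) (start : Int) (out : List (Int × Int)) : Prop := out = make_closed_helper_alt dict1 start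
instance (dict1 : List (Int × Int)) (start : Int) (out : List (Int × Int)) : Decidable (Spec_make_closed_helper dict1 start out) := by unfold Spec_make_closed_helper; infer_instance

-- ===== CLAIM (what is proved, stated in full; the proofs are below) =====
def Claim_equal_make_closed_helper : Prop := ∀ (dict1 : List (Int × Int)) (start : Int), Dom_make_closed_helper dict1 start → Pre_make_closed_helper dict1 start → Spec_make_closed_helper dict1 start (make_closed_helper dict1 start)

-- ===== LEMMAS AND PROOFS =====

theorem set_contains_eq (s : PySem.Set Int) (x : Int) :
    PySem.Set.contains s x = decide (x ∈ s) := by simp [PySem.Set.contains]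

-- the jump result's step count exceeds the entry count (so start strictly advances)
theorem walkA_jump_gt (d : List (Int × Int)) (sk lim : Int) :
    ∀ (f : Nat) (c i i' : Int), walkA d sk lim f c i = .jump i' → i < i' := by
  intro f
  induction f with
  | zero => intro c i i' h; simp [walkA] at h
  | succ f ih =>
    intro c i i' h
    simp only [walkA] at h
    rcases hv : List.lookup c d with _ | v <;> rw [hv] at h
    · cases h
    · by_cases h1 : v = sk
      · simp only [h1, if_pos] at h
        cases h
        omega
      · simp only [h1, if_neg, if_false] at h
        by_cases h2 : i + 1 > lim
        · simp only [h2, if_pos] at h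
          split at h <;> cases h
        · simp only [h2, if_neg, if_false] at h
          have := ih _ _ _ h
          omega

-- the walk's unreachable 'return dict1' branch really is unreachable
theorem walkA_ne_stop (d : List (Int × Int)) (sk lim : Int) :
    ∀ (f : Nat) (c i : Int), walkA d sk lim f c i ≠ .stop := by
  intro f
  induction f with
  | zero => intro c i h; simp [walkA] at h
  | succ f ih =>
    intro c i h
    simp only [walkA] at h
    rcases hv : List.lookup c d with _ | v <;> rw [hv] at h
    · cases h
    · by_cases h1 : v = sk
      · simp only [h1, if_pos] at h; cases h
      · simp only [h1, if_neg, if_false] at h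
        by_cases h2 : i + 1 > lim
        · simp only [h2, if_pos, if_neg, h1, if_false] at h
          simp [h1] at h
        · simp only [h2, if_neg, if_false] at h
          exact ih _ _ h

-- lookup in the dead-filtered dict = dead-masked lookup in the original dict
theorem lookup_filter_dead (dict1 : List (Int × Int)) (dead : PySem.Set Int) (c : Int) :
    List.lookup c (dict1.filter (fun p => !(PySem.Set.contains dead p.1)))
      = if PySem.Set.contains dead c then none else List.lookup c dict1 := by
  simp only [set_contains_eq]
  induction dict1 with
  | nil => simp [List.lookup]
  | cons p rest ih =>
    by_cases hp : p.1 ∈ dead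
    · rw [List.filter_cons_of_neg (by simp [hp])]
      rw [ih]
      by_cases hc : c = p.1
      · subst hc
        simp [hp]
      · have : (c == p.1) = false := by simp [hc]
        simp [List.lookup, this]
    · rw [List.filter_cons_of_pos (by simp [hp])]
      by_cases hc : c = p.1
      · subst hc
        simp [List.lookup, hp]
      · have : (c == p.1) = false := by simp [hc]
        simp only [List.lookup, this]
        exact ih

-- A's walk in the filtered dict computes exactly B's masked walk, fuel for fuel
theorem walk_corr (dict1 : List (Int × Int)) (dead : PySem.Set Int) (sk n j : Int) :
    ∀ (f : Nat) (c i : Int),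
    walkA (dict1.filter (fun p => !(PySem.Set.contains dead p.1))) sk (n - j) f c i
      = (match walkB dict1 dead sk n j f c i with
         | none => AWalk.delete
         | some t => AWalk.jump t) := by
  intro f
  induction f with
  | zero => intro c i; simp [walkA, walkB]
  | succ f ih =>
    intro c i
    simp only [walkA, walkB, lookup_filter_dead]
    rcases hv : (if PySem.Set.contains dead c then none else List.lookup c dict1) with _ | v
    · simp
    · simp only []
      by_cases h1 : v = sk
      · simp [h1]
      · by_cases h2 : i + 1 > n - j
        · simp [h1, h2]
        · simp only [h1, h2, if_neg, if_false]
          exact ih v (i + 1)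

-- with unique keys, deleting one entry = filtering its key out
theorem eraseP_eq_filter_key (d : List (Int × Int)) (k : Int)
    (hnd : (d.map Prod.fst).Nodup) :
    List.eraseP (fun p => p.1 == k) d = d.filter (fun p => !(p.1 == k)) := by
  induction d with
  | nil => simp
  | cons p rest ih =>
    simp only [List.map_cons, List.nodup_cons] at hnd
    by_cases hp : p.1 = k
    · rw [List.eraseP_cons_of_pos (by simp [hp])]
      rw [List.filter_cons_of_neg (by simp [hp])]
      symm
      apply List.filter_eq_self.mpr
      intro q hq
      simp only [Bool.not_eq_eq_eq_not, Bool.not_true, beq_eq_false_iff_ne]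
      intro hqk
      exact hnd.1 (hp ▸ hqk ▸ List.mem_map_of_mem hq)
    · rw [List.eraseP_cons_of_neg (by simp [hp])]
      rw [List.filter_cons_of_pos (by simp [hp])]
      rw [ih hnd.2]

-- taking fsts commutes with filtering on the fst (key-equality predicate)
theorem map_fst_filter_key (d : List (Int × Int)) (k : Int) :
    (d.filter (fun p => !(p.1 == k))).map Prod.fst
      = (d.map Prod.fst).filter (fun x => !(x == k)) := by
  induction d with
  | nil => simp
  | cons p rest ih =>
    by_cases hp : p.1 = k <;> simp [List.filter_cons, hp, ih]

-- taking fsts commutes with filtering on the fst (dead-set predicate)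
theorem map_fst_filter_dead (d : List (Int × Int)) (dead : PySem.Set Int) :
    (d.filter (fun p => !(PySem.Set.contains dead p.1))).map Prod.fst
      = (d.map Prod.fst).filter (fun x => !(PySem.Set.contains dead x)) := by
  simp only [set_contains_eq]
  induction d with
  | nil => simp
  | cons p rest ih =>
    by_cases hp : p.1 ∈ dead <;> simp [List.filter_cons, hp, ih]

-- removing the element at position s of a duplicate-free list drops it from the suffix
theorem filter_drop_of_nodup (l : List Int) (s : Nat) (k : Int) (rest : List Int)
    (hnd : l.Nodup) (hdrop : l.drop s = k :: rest) :
    (l.filter (fun x => !(x == k))).drop s = rest := by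
  induction l generalizing s with
  | nil => simp at hdrop
  | cons a l' ih =>
    cases s with
    | zero =>
      simp only [List.drop_zero] at hdrop ⊢
      cases hdrop
      rw [List.filter_cons_of_neg (by simp)]
      apply List.filter_eq_self.mpr
      intro x hx
      simp only [List.nodup_cons] at hnd
      simp only [Bool.not_eq_eq_eq_not, Bool.not_true, beq_eq_false_iff_ne]
      intro hxk; subst hxk; exact hnd.1 hx
    | succ s' =>
      simp only [List.drop_succ_cons] at hdrop
      simp only [List.nodup_cons] at hnd
      have hak : a ≠ k := by
        intro h; subst h
        exact hnd.1 (List.drop_subset _ _ (hdrop ▸ List.mem_cons_self))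
      rw [List.filter_cons_of_pos (by simp [hak])]
      simp only [List.drop_succ_cons]
      exact ih s' hnd.2 hdrop

-- B's final deletion loop = filtering out the dead keys
theorem foldl_eraseP_eq_filter (D : List Int) (dict1 : List (Int × Int))
    (hnd : (dict1.map Prod.fst).Nodup) :
    D.foldl (fun d k => List.eraseP (fun p => p.1 == k) d) dict1
      = dict1.filter (fun p => !(PySem.Set.contains D p.1)) := by
  simp only [set_contains_eq]
  induction D generalizing dict1 with
  | nil => simp
  | cons k D' ih =>
    simp only [List.foldl_cons]
    rw [eraseP_eq_filter_key dict1 k hnd]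
    rw [ih _ (by rw [map_fst_filter_key]; exact hnd.filter _)]
    rw [List.filter_filter]
    apply List.filter_congr
    intro p _
    by_cases h1 : p.1 = k <;> by_cases h2 : p.1 ∈ D' <;> simp [h1, h2]

-- once the position is past the end, B's loop is finished whatever the fuel
theorem bLoop_past (dict1 : List (Int × Int)) (keys : List Int) (n j : Int)
    (hj : ¬ j < n) : ∀ (f : Nat) (dead : PySem.Set Int),
    bLoop dict1 keys n f dead j = dead := by
  intro f dead
  cases f with
  | zero => rfl
  | succ f => simp [bLoop, hj]

-- the main correspondence: A's recursion from state (d, s) = filtering dict1 by the dead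
-- set B's loop computes from state (dead, j); fuel on both sides is anything at least the
-- (proved) bound on the remaining number of loop steps
theorem main_corr (dict1 : List (Int × Int)) (hnd : (dict1.map Prod.fst).Nodup) :
    ∀ (fA : Nat) (d : List (Int × Int)) (s : Int) (dead : PySem.Set Int) (j : Int) (fB : Nat),
      d = dict1.filter (fun p => !(PySem.Set.contains dead p.1)) →
      (d.map Prod.fst).drop s.toNat = (dict1.map Prod.fst).drop j.toNat →
      (d.length : Int) - s = (dict1.length : Int) - j →
      0 ≤ s →
      d.length + ((d.length : Int) - s).toNat + 1 ≤ fA →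
      ((dict1.length : Int) - j).toNat + 1 ≤ fB →
      make_closed_helper_aux d s fA =
        dict1.filter (fun p =>
          !(PySem.Set.contains (bLoop dict1 (dict1.map Prod.fst) (dict1.length : Int) fB dead j) p.1)) := by
  intro fA
  induction fA with
  | zero => intro d s dead j fB h1 h2 h3 h4 hfA hfB; omega
  | succ fA ih =>
    intro d s dead j fB h1 h2 h3 h4 hfA hfB
    by_cases hne : d = []
    · subst hne
      have h30 : (0 : Int) - s = (dict1.length : Int) - j := by simpa using h3
      have hj : ¬ (j < (dict1.length : Int)) := by omega
      rw [bLoop_past dict1 _ _ j hj fB dead]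
      simp only [make_closed_helper_aux, if_pos rfl]
      exact h1
    · by_cases hge : s ≥ (d.length : Int)
      · have hj : ¬ (j < (dict1.length : Int)) := by omega
        rw [bLoop_past dict1 _ _ j hj fB dead]
        simp only [make_closed_helper_aux, if_neg hne, if_pos hge]
        exact h1
      · -- s is a real position: d's key at s is also dict1's key at j
        have h4' := h4
        rcases hk : PySem.List.pyGet? (d.map Prod.fst) s with _ | sk
        · exfalso
          rw [PySem.List.pyGet?_of_nonneg _ h4] at hk
          rw [List.getElem?_eq_none_iff] at hk
          simp only [List.length_map] at hk
          omega
        · have hk2 := hk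
          rw [PySem.List.pyGet?_of_nonneg _ h4] at hk2
          obtain ⟨hsN, hget⟩ := List.getElem?_eq_some_iff.mp hk2
          have hslt : s < (d.length : Int) := by omega
          have hdpos : 0 < d.length := by omega
          have hdropA : (d.map Prod.fst).drop s.toNat
              = sk :: (d.map Prod.fst).drop (s.toNat + 1) := by
            rw [List.drop_eq_getElem_cons hsN, hget]
          have hdl : d.length ≤ dict1.length := by
            have := List.length_filter_le (fun p => !(PySem.Set.contains dead p.1)) dict1
            rw [← h1] at this
            exact this
          have hj0 : 0 ≤ j := by omega
          have hjlt : j < (dict1.length : Int) := by omega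
          have hd2 : (dict1.map Prod.fst).drop j.toNat
              = sk :: (d.map Prod.fst).drop (s.toNat + 1) := by
            rw [← h2, hdropA]
          have hgetB : PySem.List.pyGet? (dict1.map Prod.fst) j = some sk := by
            rw [PySem.List.pyGet?_of_nonneg _ hj0]
            have h0 := congrArg (fun l => l[0]?) hd2
            simp only [List.getElem?_drop, Nat.add_zero, List.getElem?_cons_zero] at h0
            exact h0
          obtain ⟨fB', rfl⟩ : ∃ fB'', fB = fB'' + 1 := ⟨fB - 1, by omega⟩
          have hcw := walk_corr dict1 dead sk (dict1.length : Int) j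
            (((dict1.length : Int) - j).toNat + 2) sk 0
          rw [← h1, show (dict1.length : Int) - j = (d.length : Int) - s from h3.symm] at hcw
          rcases hw : walkA d sk ((d.length : Int) - s)
              (((d.length : Int) - s).toNat + 2) sk 0 with i | _ | _
          · -- jump: a cycle of length i was found; both sides advance by i
            have hwB : walkB dict1 dead sk (dict1.length : Int) j
                (((dict1.length : Int) - j).toNat + 2) sk 0 = some i := by
              rw [show ((dict1.length : Int) - j).toNat = ((d.length : Int) - s).toNat from by
                    rw [h3]]
              rw [hw] at hcw
              rcases hW : walkB dict1 dead sk (dict1.length : Int) j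
                  (((d.length : Int) - s).toNat + 2) sk 0 with _ | t
              · rw [hW] at hcw; cases hcw
              · rw [hW] at hcw; simp only [AWalk.jump.injEq] at hcw; rw [hcw]
            have hipos : 0 < i := walkA_jump_gt d sk _ _ _ _ _ hw
            simp only [make_closed_helper_aux, if_neg hne, if_neg hge, hk, hw]
            have hstep : bLoop dict1 (dict1.map Prod.fst) (dict1.length : Int) (fB' + 1) dead j
                = bLoop dict1 (dict1.map Prod.fst) (dict1.length : Int) fB' dead (j + i) := by
              simp only [bLoop, if_pos hjlt, hgetB, hwB]
            rw [hstep]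
            apply ih d (s + i) dead (j + i) fB' h1 _ (by omega) (by omega) (by omega) (by omega)
            rw [show (s + i).toNat = s.toNat + i.toNat from by omega, ← List.drop_drop, h2,
               List.drop_drop, show j.toNat + i.toNat = (j + i).toNat from by omega]
          · -- delete: the walk died; both sides kill the key and move to the next position
            have hwB : walkB dict1 dead sk (dict1.length : Int) j
                (((dict1.length : Int) - j).toNat + 2) sk 0 = none := by
              rw [show ((dict1.length : Int) - j).toNat = ((d.length : Int) - s).toNat from by
                    rw [h3]]
              rw [hw] at hcw
              rcases hW : walkB dict1 dead sk (dict1.length : Int) j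
                  (((d.length : Int) - s).toNat + 2) sk 0 with _ | t
              · rfl
              · rw [hW] at hcw; cases hcw
            have hndd : (d.map Prod.fst).Nodup := by
              rw [h1, map_fst_filter_dead]
              exact hnd.filter _
            simp only [make_closed_helper_aux, if_neg hne, if_neg hge, hk, hw]
            have hstep : bLoop dict1 (dict1.map Prod.fst) (dict1.length : Int) (fB' + 1) dead j
                = bLoop dict1 (dict1.map Prod.fst) (dict1.length : Int) fB'
                    (PySem.Set.add dead sk) (j + 1) := by
              simp only [bLoop, if_pos hjlt, hgetB, hwB]
            rw [hstep]
            have hlenE : (List.eraseP (fun p => p.1 == sk) d).length = d.length - 1 := by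
              obtain ⟨q, hq⟩ := List.mem_map.mp (hget ▸ List.getElem_mem hsN)
              exact List.length_eraseP_of_mem hq.1 (by simp [hq.2])
            apply ih _ s (PySem.Set.add dead sk) (j + 1) fB'
            · rw [eraseP_eq_filter_key d sk hndd, h1, List.filter_filter]
              apply List.filter_congr
              intro p _
              simp only [set_contains_eq]
              by_cases hp1 : p.1 ∈ dead <;> by_cases hp2 : p.1 = sk <;>
                simp [PySem.Set.mem_add, hp1, hp2]
            · rw [eraseP_eq_filter_key d sk hndd, map_fst_filter_key,
                filter_drop_of_nodup (d.map Prod.fst) s.toNat sk _ hndd hdropA]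
              conv_rhs => rw [show (j + 1).toNat = j.toNat + 1 from by omega,
                ← List.drop_drop, hd2]
              simp
            · rw [hlenE]
              push_cast [Nat.cast_sub (by omega : 1 ≤ d.length)]
              omega
            · exact h4
            · rw [hlenE]; omega
            · omega
          · exact absurd hw (walkA_ne_stop d sk _ _ _ _)

-- ===== VERDICT (by name: the statement is the Claim_ definition above) =====
theorem make_closed_helper_spec : Claim_equal_make_closed_helper := by
  intro dict1 start _hDom hPre
  unfold Spec_make_closed_helper
  obtain ⟨hnd, hst⟩ := hPre
  by_cases hcase : dict1 = [] ∨ start ≥ (dict1.length : Int)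
  · rw [make_closed_helper_alt, if_pos hcase]
    rcases hcase with hemp | hge
    · subst hemp
      rw [make_closed_helper]
      cases h : ([] : List (Int × Int)).length + ((0 : Int) - start).toNat + 1 with
      | zero => rfl
      | succ f => simp [make_closed_helper_aux]
    · rw [make_closed_helper]
      rw [show dict1.length + ((dict1.length : Int) - start).toNat + 1
            = (dict1.length + ((dict1.length : Int) - start).toNat) + 1 from rfl]
      by_cases hemp : dict1 = []
      · simp [make_closed_helper_aux, hemp]
      · simp [make_closed_helper_aux, hemp, hge]
  · have hcase' := hcase
    push Not at hcase'
    obtain ⟨hne, hlt⟩ := hcase'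
    have h0 : 0 ≤ start := hst.resolve_right hne
    rw [make_closed_helper, make_closed_helper_alt, if_neg hcase]
    rw [main_corr dict1 hnd _ dict1 start PySem.Set.empty start
          (((dict1.length : Int) - start).toNat + 1)
          (by symm; apply List.filter_eq_self.mpr; intro p _; simp [set_contains_eq, PySem.Set.empty])
          rfl rfl h0 (by omega) (by omega)]
    rw [foldl_eraseP_eq_filter _ dict1 hnd]
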